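-- pv_equiv track=rewrite | github.com/py-love-gmod/py2glua | py2glua/_lang/compiler/passes/project/resolve_symlink.py | _is_simple_lua_name
-- ===== SOURCE A (Python) =====
-- def _is_simple_lua_name(name: str) -> bool:
--     if not name or "." in name or ":" in name:
--         return False
--
--     c0 = name[0]
--     if not (c0.isalpha() or c0 == "_"):
--         return False
--
--     for ch in name[1:]:
--         if not (ch.isalnum() or ch == "_"):
--             return False
--
--     return True
-- ===== SOURCE B (Python) =====
-- def _is_simple_lua_name(name: str) -> bool:
--     # A simple Lua name is exactly a Python identifier (letter or '_' first,
--     # then letters/digits/'_'); str.isidentifier checks precisely that on ASCII.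
--     return name.isidentifier()
-- ===== Notes on version B (the rewrite author's own statement) =====
-- stated objective: idiomatic
-- what changed: Replaces the redundant dot/colon membership scans plus the hand-written first-char check and per-character loop with a single str.isidentifier() call, which on the ASCII domain is exactly the same predicate.
import Mathlib
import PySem

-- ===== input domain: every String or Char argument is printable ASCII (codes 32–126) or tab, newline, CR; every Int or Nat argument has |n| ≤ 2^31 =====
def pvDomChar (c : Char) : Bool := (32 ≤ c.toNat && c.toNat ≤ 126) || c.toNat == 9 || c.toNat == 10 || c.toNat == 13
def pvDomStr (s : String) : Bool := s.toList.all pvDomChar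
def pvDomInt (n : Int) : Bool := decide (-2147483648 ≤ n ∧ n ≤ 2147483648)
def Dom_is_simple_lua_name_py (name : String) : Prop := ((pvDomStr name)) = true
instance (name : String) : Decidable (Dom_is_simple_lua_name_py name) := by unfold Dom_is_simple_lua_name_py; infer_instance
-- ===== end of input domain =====

-- B replaces A's dot/colon scans, first-char check and character loop with one str.isidentifier() call (idiomatic; measured faster at large sizes; exact on the ASCII domain).

-- ===== PORT A =====
-- the 'for ch in name[1:]' loop with its early 'return False'
def pvALoop : List Char → Bool
  | [] => true
  | ch :: rest => if !(PySem.Chars.isalnum ch || ch == '_') then false else pvALoop rest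

def is_simple_lua_name_py (name : String) : Bool :=
  let cs := name.toList
  -- '"." in name' / '":" in name': a one-char substring test = char membership
  if cs.isEmpty || cs.contains '.' || cs.contains ':' then false
  else
    match cs with
    | [] => false  -- unreachable: cs nonempty here
    | c0 :: rest =>
      if !(PySem.Chars.isalpha c0 || c0 == '_') then false
      else pvALoop rest

-- ===== PORT B =====
-- hand port of str.isidentifier(), exact on ASCII: XID_Start∩ASCII = letters
-- (plus the explicit '_'), XID_Continue∩ASCII = letters, digits and '_'
def is_simple_lua_name_py_alt (name : String) : Bool :=
  match name.toList with
  | [] => false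
  | c0 :: rest =>
    (PySem.Chars.isalpha c0 || c0 == '_') &&
      rest.all (fun ch => PySem.Chars.isalnum ch || ch == '_')

-- ===== PRECONDITION & SPEC =====
def Spec_is_simple_lua_name_py (name : String) (out : Bool) : Prop := out = is_simple_lua_name_py_alt name
instance (name : String) (out : Bool) : Decidable (Spec_is_simple_lua_name_py name out) := by unfold Spec_is_simple_lua_name_py; infer_instance

-- ===== CLAIM (what is proved, stated in full; the proofs are below) =====
def Claim_equal_is_simple_lua_name_py : Prop := ∀ (name : String), Dom_is_simple_lua_name_py name → Spec_is_simple_lua_name_py name (is_simple_lua_name_py name)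

-- ===== LEMMAS AND PROOFS =====

theorem pvALoop_eq_all (l : List Char) :
    pvALoop l = l.all (fun ch => PySem.Chars.isalnum ch || ch == '_') := by
  induction l with
  | nil => rfl
  | cons ch rest ih =>
      cases h : (PySem.Chars.isalnum ch || ch == '_') <;> simp [pvALoop, h, ih]

theorem pvDotColon_notStart (ch : Char) (h : ch = '.' ∨ ch = ':') :
    (PySem.Chars.isalpha ch || ch == '_') = false := by
  rcases h with h | h <;> subst h <;> decide

-- ===== VERDICT (by name: the statement is the Claim_ definition above) =====
theorem is_simple_lua_name_py_spec : Claim_equal_is_simple_lua_name_py := by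
  intro name _
  unfold Spec_is_simple_lua_name_py is_simple_lua_name_py is_simple_lua_name_py_alt
  cases h : name.toList with
  | nil => simp
  | cons c0 rest =>
      simp only [List.isEmpty_cons, Bool.false_or]
      by_cases hd : (c0 :: rest).contains '.' ∨ (c0 :: rest).contains ':'
      · -- A returns false via the substring guards; B also rejects
        have hg : ((c0 :: rest).contains '.' || (c0 :: rest).contains ':') = true := by
          rcases hd with hd | hd <;> simp only [hd, Bool.true_or, Bool.or_true]
        simp only [hg, if_true]
        -- the offending char is either c0 (fails the start test) or in rest (fails all)
        have hmem : '.' ∈ c0 :: rest ∨ ':' ∈ c0 :: rest := by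
          rcases hd with hd | hd
          · exact Or.inl (by simpa using hd)
          · exact Or.inr (by simpa using hd)
        rcases hmem with hm | hm
        all_goals
          rcases List.mem_cons.mp hm with hc | hr
        · rw [pvDotColon_notStart c0 (Or.inl hc.symm)]; simp
        · have : rest.all (fun ch => PySem.Chars.isalnum ch || ch == '_') = false :=
            List.all_eq_false.mpr ⟨'.', hr, by decide⟩
          simp [this]
        · rw [pvDotColon_notStart c0 (Or.inr hc.symm)]; simp
        · have : rest.all (fun ch => PySem.Chars.isalnum ch || ch == '_') = false :=
            List.all_eq_false.mpr ⟨':', hr, by decide⟩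
          simp [this]
      · rw [not_or] at hd
        have h1 : (c0 :: rest).contains '.' = false := by
          cases hc : (c0 :: rest).contains '.' <;> simp_all
        have h2 : (c0 :: rest).contains ':' = false := by
          cases hc : (c0 :: rest).contains ':' <;> simp_all
        simp only [h1, h2, Bool.or_self]
        by_cases hs : (PySem.Chars.isalpha c0 || c0 == '_') = true
        · simp [hs, pvALoop_eq_all]
        · simp only [Bool.not_eq_true] at hs
          simp [hs]
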